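-- pv_equiv track=rewrite | github.com/researchartifact-oss/Evolution-of-Log-Based-Detection-Rules | data_prep/build_src/build_semantic_lineage_metadata.py | all_ids_share_same_exact_paths
-- ===== SOURCE A (Python) =====
-- from collections import defaultdict
-- from typing import Any, Dict, List, Optional, Sequence, Tuple
--
-- def _exact_paths_by_id(commits: List[Dict[str, Any]]) -> Dict[str, set]:
--     out: Dict[str, set] = defaultdict(set)
--     for c in commits:
--         rid = c.get("id")
--         p = c.get("path_used")
--         if rid and p:
--             out[rid].add(p)
--     return out
--
-- def all_ids_share_same_exact_paths(
--     commits: List[Dict[str, Any]]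
-- ) -> Tuple[bool, Dict[str, List[str]]]:
--     """
--     Returns True iff every ID with at least one path_used has the exact same
--     non-empty set of paths. Used as a hard guard against false splits in SSC.
--     """
--     by_id = _exact_paths_by_id(commits)
--     nonempty = {rid: paths for rid, paths in by_id.items() if paths}
--     if len(nonempty) <= 1:
--         return False, {rid: sorted(paths) for rid, paths in by_id.items()}
--     path_sets = list(nonempty.values())
--     same = all(path_sets[i] == path_sets[0] for i in range(1, len(path_sets)))
--     return same, {rid: sorted(paths) for rid, paths in by_id.items()}
-- ===== SOURCE B (Python) =====
-- def all_ids_share_same_exact_paths(commits):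
--     # One pass: keep each id's paths as a duplicate-free *sorted list* (canonical
--     # form), so the final per-id sort disappears and "same set" is plain list equality.
--     table = {}
--     for c in commits:
--         rid = c.get("id")
--         p = c.get("path_used")
--         if rid and p:
--             lst = table.setdefault(rid, [])
--             i = 0
--             while i < len(lst) and lst[i] < p:
--                 i += 1
--             if i == len(lst) or lst[i] != p:
--                 lst.insert(i, p)
--     vals = list(table.values())
--     same = len(vals) >= 2 and all(v == vals[0] for v in vals[1:])
--     return same, table
-- ===== Notes on version B (the rewrite author's own statement) =====
-- stated objective: simpler
-- what changed: B keeps one dict mapping each id to a duplicate-free sorted list maintained by in-place sorted insertion, so A's per-id sets, the nonempty-filter pass, the final per-id sort and the index-based comparison loop all disappear: 'same' is plain list equality of the canonical sorted lists.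
import Mathlib
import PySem

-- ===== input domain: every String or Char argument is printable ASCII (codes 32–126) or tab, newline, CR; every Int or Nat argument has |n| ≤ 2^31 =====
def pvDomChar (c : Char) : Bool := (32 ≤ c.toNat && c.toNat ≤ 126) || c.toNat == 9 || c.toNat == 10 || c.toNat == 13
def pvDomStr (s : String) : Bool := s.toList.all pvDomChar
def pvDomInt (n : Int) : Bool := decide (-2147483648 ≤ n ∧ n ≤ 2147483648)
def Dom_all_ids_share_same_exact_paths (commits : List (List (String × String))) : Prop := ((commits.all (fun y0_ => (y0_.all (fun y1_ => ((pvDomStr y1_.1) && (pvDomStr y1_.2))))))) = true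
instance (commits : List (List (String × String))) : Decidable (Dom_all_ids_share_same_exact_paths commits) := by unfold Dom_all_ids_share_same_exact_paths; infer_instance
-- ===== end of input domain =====

-- B keeps each id's paths as one duplicate-free sorted list built in a single pass,
-- so the nonempty-filter, the per-id set, the final sort and the index loop of A disappear;
-- objective: simpler (no speed claim).

-- ===== PORT A =====
def pvExactPathsById (commits : List (List (String × String))) : PySem.Dict String (PySem.Set String) :=
  commits.foldl (fun out c =>
    match (PySem.Dict.mk c).get? "id", (PySem.Dict.mk c).get? "path_used" with
    | some rid, some p =>
        if rid ≠ "" ∧ p ≠ "" then out.modify rid [] (fun s => PySem.Set.add s p) else out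
    | _, _ => out) PySem.Dict.empty

def all_ids_share_same_exact_paths (commits : List (List (String × String))) : Bool × (List (String × List String)) :=
  let by_id := pvExactPathsById commits
  let nonempty : PySem.Dict String (PySem.Set String) :=
    PySem.Dict.mk (by_id.items.filter (fun kv => !kv.2.isEmpty))
  if nonempty.size ≤ 1 then
    (false, by_id.items.map (fun kv => (kv.1, PySem.List.sorted kv.2 (fun x => x))))
  else
    let path_sets := nonempty.values
    let same := (PySem.List.pyRange 1 (path_sets.length : Int)).all
      (fun i => PySem.Set.equal (PySem.List.pyGetD path_sets i []) (PySem.List.pyGetD path_sets 0 []))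
    (same, by_id.items.map (fun kv => (kv.1, PySem.List.sorted kv.2 (fun x => x))))

-- ===== PORT B =====
-- Source B's while-loop scan + insert, as a structural recursion on the sorted list
def pvInsortUnique (p : String) : List String → List String
  | [] => [p]
  | x :: xs => if x < p then x :: pvInsortUnique p xs
               else if x = p then x :: xs
               else p :: x :: xs

def all_ids_share_same_exact_paths_alt (commits : List (List (String × String))) : Bool × (List (String × List String)) :=
  let table := commits.foldl (fun t c =>
    match (PySem.Dict.mk c).get? "id", (PySem.Dict.mk c).get? "path_used" with
    | some rid, some p =>
        if rid ≠ "" ∧ p ≠ "" then t.modify rid [] (pvInsortUnique p) else t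
    | _, _ => t) (PySem.Dict.empty : PySem.Dict String (List String))
  let same := match table.values with
    | v0 :: v1 :: rest => (v1 :: rest).all (fun v => v == v0)
    | _ => false
  (same, table.items)

-- ===== PRECONDITION & SPEC =====
def Spec_all_ids_share_same_exact_paths (commits : List (List (String × String))) (out : Bool × (List (String × List String))) : Prop := out = all_ids_share_same_exact_paths_alt commits
instance (commits : List (List (String × String))) (out : Bool × (List (String × List String))) : Decidable (Spec_all_ids_share_same_exact_paths commits out) := by unfold Spec_all_ids_share_same_exact_paths; infer_instance

-- ===== CLAIM (what is proved, stated in full; the proofs are below) =====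
def Claim_equal_all_ids_share_same_exact_paths : Prop := ∀ (commits : List (List (String × String))), Dom_all_ids_share_same_exact_paths commits → Spec_all_ids_share_same_exact_paths commits (all_ids_share_same_exact_paths commits)

-- ===== LEMMAS AND PROOFS =====

-- the (id, path) pairs both loops actually act on
def pvPairs (commits : List (List (String × String))) : List (String × String) :=
  commits.filterMap (fun c =>
    match (PySem.Dict.mk c).get? "id", (PySem.Dict.mk c).get? "path_used" with
    | some rid, some p => if rid ≠ "" ∧ p ≠ "" then some (rid, p) else none
    | _, _ => none)

theorem pvFold_eq_pairs {δ : Type} (g : δ → String → String → δ) :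
    ∀ (commits : List (List (String × String))) (d : δ),
    commits.foldl (fun t c =>
      match (PySem.Dict.mk c).get? "id", (PySem.Dict.mk c).get? "path_used" with
      | some rid, some p => if rid ≠ "" ∧ p ≠ "" then g t rid p else t
      | _, _ => t) d
    = (pvPairs commits).foldl (fun t rq => g t rq.1 rq.2) d := by
  intro commits
  induction commits with
  | nil => intro d; rfl
  | cons c cs ih =>
    intro d
    simp only [List.foldl_cons, pvPairs, List.filterMap_cons]
    cases h1 : (PySem.Dict.mk c).get? "id" <;> cases h2 : (PySem.Dict.mk c).get? "path_used" <;>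
      simp only []
    · exact ih d
    · exact ih d
    · exact ih d
    · split_ifs with h
      · simpa [pvPairs] using ih _
      · simpa [pvPairs] using ih d

-- strictly-sorted-insert facts
theorem pvInsort_mem (p y : String) : ∀ (l : List String), y ∈ pvInsortUnique p l → y = p ∨ y ∈ l := by
  intro l
  induction l with
  | nil => simp [pvInsortUnique]
  | cons x xs ih =>
    simp only [pvInsortUnique]
    split_ifs with h1 h2
    · intro hy
      rcases List.mem_cons.mp hy with h | h
      · exact Or.inr (by simp [h])
      · rcases ih h with h' | h'
        · exact Or.inl h'
        · exact Or.inr (by simp [h'])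
    · intro hy; exact Or.inr hy
    · intro hy
      rcases List.mem_cons.mp hy with h | h
      · exact Or.inl h
      · exact Or.inr h

theorem pvInsort_of_mem (p : String) : ∀ (l : List String), l.Pairwise (· < ·) → p ∈ l →
    pvInsortUnique p l = l := by
  intro l
  induction l with
  | nil => simp
  | cons x xs ih =>
    intro hp hm
    rcases List.pairwise_cons.mp hp with ⟨hall, htail⟩
    simp only [pvInsortUnique]
    rcases List.mem_cons.mp hm with h | h
    · subst h; simp
    · have hxp : x < p := hall p h
      simp only [if_pos hxp]
      rw [ih htail h]

theorem pvInsort_of_not_mem (p : String) : ∀ (l : List String), l.Pairwise (· < ·) → p ∉ l →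
    (pvInsortUnique p l).Perm (p :: l) ∧ (pvInsortUnique p l).Pairwise (· < ·) := by
  intro l
  induction l with
  | nil => simp [pvInsortUnique]
  | cons x xs ih =>
    intro hp hm
    rcases List.pairwise_cons.mp hp with ⟨hall, htail⟩
    have hpx : p ≠ x := fun h => hm (by simp [h])
    have hpxs : p ∉ xs := fun h => hm (by simp [h])
    simp only [pvInsortUnique]
    split_ifs with h1 h2
    · rcases ih htail hpxs with ⟨hperm, hpair⟩
      constructor
      · exact (hperm.cons x).trans (List.Perm.swap p x xs)
      · refine List.pairwise_cons.mpr ⟨?_, hpair⟩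
        intro y hy
        rcases pvInsort_mem p y xs hy with h | h
        · exact h ▸ h1
        · exact hall y h
    · exact absurd h2 (Ne.symm hpx)
    · have hpltx : p < x := lt_of_le_of_ne (not_lt.mp h1) hpx
      refine ⟨List.Perm.refl _, List.pairwise_cons.mpr ⟨?_, hp⟩⟩
      intro y hy
      rcases List.mem_cons.mp hy with h | h
      · exact h ▸ hpltx
      · exact lt_trans hpltx (hall y h)

-- inserting into the canonical sorted listing of a set = sorted listing of set.add
theorem pvInsort_sorted (s : PySem.Set String) (q : String) (hnd : s.Nodup) :
    pvInsortUnique q (PySem.List.sorted s (fun x => x)) = PySem.List.sorted (PySem.Set.add s q) (fun x => x) := by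
  have hperm : (PySem.List.sorted s (fun x => x)).Perm s := PySem.List.sorted_perm s (fun x => x) false
  have hnd' : (PySem.List.sorted s (fun x => x)).Nodup := hperm.nodup_iff.mpr hnd
  have hle : (PySem.List.sorted s (fun x => x)).Pairwise (· ≤ ·) := PySem.List.sorted_pairwise s (fun x => x)
  have hlt : (PySem.List.sorted s (fun x => x)).Pairwise (· < ·) :=
    (hle.and hnd').imp (fun h => lt_of_le_of_ne h.1 h.2)
  by_cases hq : q ∈ s
  · rw [PySem.Set.add_of_mem hq, pvInsort_of_mem q _ hlt (hperm.mem_iff.mpr hq)]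
  · rcases pvInsort_of_not_mem q _ hlt (fun h => hq (hperm.mem_iff.mp h)) with ⟨hp2, hpair2⟩
    rw [PySem.Set.add_of_not_mem hq]
    exact (PySem.List.sorted_eq_of_perm_of_pairwise_lt _ _ _
      (hp2.trans ((hperm.cons q).trans (List.perm_append_singleton q s).symm)) hpair2).symm

-- invariant tying A's dict of sets to B's dict of sorted lists
def pvRel (dA : PySem.Dict String (PySem.Set String)) (dB : PySem.Dict String (List String)) : Prop :=
  dB.items = dA.items.map (fun kv => (kv.1, PySem.List.sorted kv.2 (fun x => x))) ∧
  dA.keys.Nodup ∧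
  ∀ kv ∈ dA.items, kv.2.Nodup ∧ kv.2 ≠ []

theorem pvRel_step (dA : PySem.Dict String (PySem.Set String)) (dB : PySem.Dict String (List String))
    (r q : String) (h : pvRel dA dB) :
    pvRel (dA.modify r [] (fun s => PySem.Set.add s q)) (dB.modify r [] (pvInsortUnique q)) := by
  obtain ⟨hitems, hknd, hvals⟩ := h
  have hkeys : dB.keys = dA.keys := by
    show dB.items.map _ = dA.items.map _
    rw [hitems, List.map_map]; rfl
  have hBknd : dB.keys.Nodup := hkeys ▸ hknd
  have hmod : ∀ {ν : Type} (d : PySem.Dict String ν) (f : ν → ν) (d0 : ν),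
      d.modify r d0 f = d.insert r (f (d.getD r d0)) := fun d f d0 => rfl
  rw [hmod, hmod]
  by_cases hc : dA.contains r = true
  · -- r present: both replace the entry in place
    have hrk : r ∈ dA.keys := (PySem.Dict.contains_iff_mem_keys dA r).mp hc
    obtain ⟨kv, hkv, hfst⟩ := List.mem_map.mp hrk
    obtain ⟨s, hs⟩ : ∃ s, (r, s) ∈ dA.items := ⟨kv.2, by rwa [show (r, kv.2) = kv by cases kv; simp_all]⟩
    have hgA : dA.getD r [] = s := PySem.Dict.getD_of_mem_items dA hs hknd []
    have hsB : (r, PySem.List.sorted s (fun x => x)) ∈ dB.items := by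
      rw [hitems]; exact List.mem_map.mpr ⟨(r, s), hs, rfl⟩
    have hgB : dB.getD r [] = PySem.List.sorted s (fun x => x) :=
      PySem.Dict.getD_of_mem_items dB hsB hBknd []
    have hcB : dB.contains r = true := by
      rw [PySem.Dict.contains_iff_mem_keys, hkeys]; exact hrk
    have hsnd : s.Nodup := (hvals (r, s) hs).1
    refine ⟨?_, ?_, ?_⟩
    · rw [hgA, hgB, PySem.Dict.items_insert_of_contains dA _ hc,
        PySem.Dict.items_insert_of_contains dB _ hcB, hitems,
        pvInsort_sorted s q hsnd, List.map_map, List.map_map]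
      apply List.map_congr_left
      intro a _
      by_cases hae : a.1 = r <;> simp [hae]
    · exact PySem.Dict.nodup_keys_insert dA r _ hknd
    · intro kv hkv'
      rcases (PySem.Dict.mem_items_insert dA r _ kv).mp hkv' with h | ⟨h, _⟩
      · subst h
        rw [hgA]
        refine ⟨PySem.Set.nodup_add s q hsnd, ?_⟩
        have := (hvals (r, s) hs).2
        rw [PySem.Set.add_eq_ite]
        split_ifs with hm <;> simp_all
      · exact hvals kv h
  · -- r fresh: both append a singleton entry
    have hc' : dA.contains r = false := by cases h : dA.contains r <;> simp_all
    have hcB : dB.contains r = false := by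
      cases h : dB.contains r
      · rfl
      · exact absurd ((PySem.Dict.contains_iff_mem_keys dA r).mpr
          (hkeys ▸ (PySem.Dict.contains_iff_mem_keys dB r).mp h)) hc
    have hgA : dA.getD r [] = [] := PySem.Dict.getD_of_not_contains dA [] hc'
    have hgB : dB.getD r [] = [] := PySem.Dict.getD_of_not_contains dB [] hcB
    have haddq : PySem.Set.add ([] : PySem.Set String) q = [q] := rfl
    refine ⟨?_, ?_, ?_⟩
    · rw [hgA, hgB, PySem.Dict.items_insert_of_not_contains dA _ hc',
        PySem.Dict.items_insert_of_not_contains dB _ hcB, hitems, List.map_append, haddq]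
      simp [pvInsortUnique, PySem.List.sorted_eq_self_of_pairwise]
    · exact PySem.Dict.nodup_keys_insert dA r _ hknd
    · intro kv hkv'
      rcases (PySem.Dict.mem_items_insert dA r _ kv).mp hkv' with h | ⟨h, _⟩
      · subst h; rw [hgA, haddq]; exact ⟨List.nodup_singleton q, by simp⟩
      · exact hvals kv h

theorem pvRel_foldl : ∀ (ps : List (String × String)) (dA : PySem.Dict String (PySem.Set String))
    (dB : PySem.Dict String (List String)), pvRel dA dB →
    pvRel (ps.foldl (fun d rq => d.modify rq.1 [] (fun s => PySem.Set.add s rq.2)) dA)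
          (ps.foldl (fun d rq => d.modify rq.1 [] (pvInsortUnique rq.2)) dB) := by
  intro ps
  induction ps with
  | nil => intro dA dB h; exact h
  | cons rq t ih =>
    intro dA dB h
    exact ih _ _ (pvRel_step dA dB rq.1 rq.2 h)

-- the two "all path sets agree" tests agree on a list of nonempty duplicate-free sets
theorem pvSame_eq (ps : List (PySem.Set String)) (hnd : ∀ s ∈ ps, s.Nodup) :
    (if ps.length ≤ 1 then false
     else (PySem.List.pyRange 1 (ps.length : Int)).all
       (fun i => PySem.Set.equal (PySem.List.pyGetD ps i []) (PySem.List.pyGetD ps 0 [])))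
    = (match ps.map (fun s => PySem.List.sorted s (fun x => x)) with
       | v0 :: v1 :: rest => (v1 :: rest).all (fun v => v == v0)
       | _ => false) := by
  match ps, hnd with
  | [], _ => rfl
  | [s], _ => rfl
  | s0 :: s1 :: rest, hnd =>
    rw [if_neg (by simp)]
    simp only [List.map_cons]
    rw [Bool.eq_iff_iff]
    have hget0 : PySem.List.pyGetD (s0 :: s1 :: rest) 0 [] = s0 := by
      rw [PySem.List.pyGetD_of_nonneg _ _ le_rfl]; rfl
    have heqv : ∀ s ∈ s1 :: rest, (PySem.Set.equal s s0 = true ↔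
        ((PySem.List.sorted s fun x => x) == (PySem.List.sorted s0 fun x => x)) = true) := by
      intro s hs
      rw [beq_iff_eq, PySem.List.sorted_id_eq_sorted_id_iff_perm, PySem.Set.equal_iff,
        ← List.perm_ext_iff_of_nodup (hnd s (by simp [hs])) (hnd s0 (by simp))]
    constructor
    · intro hall
      rw [List.all_eq_true]
      intro v hv
      obtain ⟨s, hs, rfl⟩ : ∃ s ∈ s1 :: rest, (PySem.List.sorted s fun x => x) = v := by
        rcases List.mem_cons.mp hv with h | h
        · exact ⟨s1, by simp, h.symm⟩
        · obtain ⟨s, hs, he⟩ := List.mem_map.mp h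
          exact ⟨s, by simp [hs], he⟩
      obtain ⟨j, hj, hjel⟩ := List.mem_iff_getElem.mp hs
      have hmem : ((j : Int) + 1) ∈ PySem.List.pyRange 1 ((s0 :: s1 :: rest).length : Int) := by
        rw [PySem.List.mem_pyRange_one]
        simp only [List.length_cons] at hj ⊢
        omega
      have := List.all_eq_true.mp hall _ hmem
      rw [hget0, PySem.List.pyGetD_of_nonneg _ _ (by omega)] at this
      have hidx : ((j : Int) + 1).toNat = j + 1 := by omega
      rw [hidx] at this
      have hget : (s0 :: s1 :: rest).getD (j + 1) [] = s := by
        rw [List.getD_eq_getElem _ _ (by simp only [List.length_cons] at hj ⊢; omega)]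
        simpa using hjel
      rw [hget] at this
      exact (heqv s hs).mp this
    · intro hall
      rw [List.all_eq_true]
      intro i hi
      rw [PySem.List.mem_pyRange_one] at hi
      rw [hget0, PySem.List.pyGetD_of_nonneg _ _ (by omega)]
      have hilen : i.toNat < (s0 :: s1 :: rest).length := by
        simp only [List.length_cons] at hi ⊢; omega
      rw [List.getD_eq_getElem _ _ hilen]
      set s := (s0 :: s1 :: rest)[i.toNat] with hsdef
      have hs : s ∈ s1 :: rest := by
        obtain ⟨j, hj⟩ : ∃ j, i.toNat = j + 1 := ⟨i.toNat - 1, by omega⟩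
        rw [List.mem_iff_getElem]
        exact ⟨j, by simp only [List.length_cons] at hilen ⊢; omega, by simp [hsdef, hj]⟩
      refine (heqv s hs).mpr ?_
      rcases List.mem_cons.mp hs with h | h
      · exact List.all_eq_true.mp hall _ (by simp [h])
      · exact List.all_eq_true.mp hall _ (by
          simp only [List.mem_cons]
          exact Or.inr (List.mem_map.mpr ⟨s, h, rfl⟩))

-- ===== VERDICT (by name: the statement is the Claim_ definition above) =====
theorem all_ids_share_same_exact_paths_spec : Claim_equal_all_ids_share_same_exact_paths := by
  intro commits _
  unfold Spec_all_ids_share_same_exact_paths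
  unfold all_ids_share_same_exact_paths all_ids_share_same_exact_paths_alt pvExactPathsById
  rw [pvFold_eq_pairs, pvFold_eq_pairs]
  have hrel := pvRel_foldl (pvPairs commits) PySem.Dict.empty PySem.Dict.empty
    ⟨rfl, List.nodup_nil, by intro kv h; cases h⟩
  set dA := (pvPairs commits).foldl (fun d rq => d.modify rq.1 [] (fun s => PySem.Set.add s rq.2))
    (PySem.Dict.empty : PySem.Dict String (PySem.Set String)) with hdA
  set dB := (pvPairs commits).foldl (fun d rq => d.modify rq.1 [] (pvInsortUnique rq.2))
    (PySem.Dict.empty : PySem.Dict String (List String)) with hdB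
  obtain ⟨hitems, _, hvals⟩ := hrel
  have hfilter : dA.items.filter (fun kv => !kv.2.isEmpty) = dA.items := by
    rw [List.filter_eq_self]
    intro kv hkv
    have := (hvals kv hkv).2
    simp_all
  have houtmap : dB.items = dA.items.map (fun kv => (kv.1, PySem.List.sorted kv.2 (fun x => x))) := hitems
  simp only [hfilter]
  have hsize : (PySem.Dict.mk dA.items).size = dA.items.length := rfl
  have hvaluesA : (PySem.Dict.mk dA.items).values = dA.items.map (·.2) := rfl
  have hvaluesB : dB.values = (dA.items.map (·.2)).map (fun s => PySem.List.sorted s (fun x => x)) := by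
    show dB.items.map (·.2) = _
    rw [hitems, List.map_map, List.map_map]; rfl
  have hsame := pvSame_eq (dA.items.map (·.2)) (by
    intro s hs
    obtain ⟨kv, hkv, rfl⟩ := List.mem_map.mp hs
    exact (hvals kv hkv).1)
  rw [hsize, hvaluesA] at *
  rw [hvaluesB, ← houtmap]
  split_ifs with hle
  · rw [if_pos (by simpa using hle)] at hsame
    rw [← hsame]
  · rw [if_neg (by simpa using hle)] at hsame
    rw [hsame]
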